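-- pv_equiv track=rewrite | github.com/kraggore/stackoverflow_scraper_api | Scraper.py | get_rep_form_text
-- ===== SOURCE A (Python) =====
-- def get_rep_form_text(text: str = ''):
--     rep = ''
--     for n in text:
--         if n.isdigit():
--             rep = n + rep
--         elif n == ',':
--             continue
--         else:
--             break
--     try:
--         rep = int(rep)
--     except ValueError:
--         rep = 0
--     return rep
-- ===== SOURCE B (Python) =====
-- def get_rep_form_text(text: str = ''):
--     # Find the length of the leading run of digits/commas, then transform it
--     # wholesale: drop commas, reverse, convert (0 when nothing was found).
--     i = 0
--     while i < len(text) and (text[i].isdigit() or text[i] == ','):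
--         i += 1
--     p = text[:i].replace(',', '')[::-1]
--     return int(p) if p else 0
-- ===== Notes on version B (the rewrite author's own statement) =====
-- stated objective: simpler
-- what changed: Instead of building the reversed numeral character by character inside a three-branch loop, B only scans for the length of the leading digit/comma run and then produces the result by whole-string operations: slice, comma removal, reversal, one int() conversion.
import Mathlib
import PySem

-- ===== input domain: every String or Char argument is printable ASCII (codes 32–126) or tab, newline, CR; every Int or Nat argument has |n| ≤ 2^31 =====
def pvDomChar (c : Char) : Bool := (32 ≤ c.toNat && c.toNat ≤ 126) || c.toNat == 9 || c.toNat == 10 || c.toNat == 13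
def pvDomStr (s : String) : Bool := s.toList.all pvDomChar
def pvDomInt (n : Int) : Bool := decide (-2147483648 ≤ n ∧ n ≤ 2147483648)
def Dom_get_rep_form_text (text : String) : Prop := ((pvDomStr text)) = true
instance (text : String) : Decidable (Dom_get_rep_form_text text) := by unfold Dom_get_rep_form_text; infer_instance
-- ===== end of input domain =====

-- B replaces A's char-by-char reversed accumulation (three-branch loop) by a prefix-length
-- scan followed by whole-string slice/comma-removal/reversal/int-conversion; objective: simpler.

-- ===== PORT A =====
-- A's loop: prepend digits to rep, skip commas, break otherwise.
def pvLoopA : List Char → List Char → List Char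
  | [], acc => acc
  | c :: cs, acc =>
    if PySem.Chars.isdigit c then pvLoopA cs (c :: acc)
    else if c == ',' then pvLoopA cs acc
    else acc

def get_rep_form_text (text : String) : Int :=
  let rep := pvLoopA text.toList []
  -- try: rep = int(rep) except ValueError: rep = 0
  match PySem.Int.ofChars? rep with
  | some v => v
  | none => 0

-- ===== PORT B =====
-- B's while loop: length of the leading run of digits/commas.
def pvPrefLenB : List Char → Nat
  | [] => 0
  | c :: cs => if PySem.Chars.isdigit c || c == ',' then pvPrefLenB cs + 1 else 0

def get_rep_form_text_alt (text : String) : Int :=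
  let l := text.toList
  -- text[:i].replace(',', '')[::-1]
  let p := ((l.take (pvPrefLenB l)).filter (fun c => !(c == ','))).reverse
  -- int(p) if p else 0  (int() cannot fail here: p is a nonempty digit string)
  if p.isEmpty then 0 else (PySem.Int.ofChars? p).getD 0

-- ===== PRECONDITION & SPEC =====
def Spec_get_rep_form_text (text : String) (out : Int) : Prop := out = get_rep_form_text_alt text
instance (text : String) (out : Int) : Decidable (Spec_get_rep_form_text text out) := by unfold Spec_get_rep_form_text; infer_instance

-- ===== CLAIM (what is proved, stated in full; the proofs are below) =====
def Claim_equal_get_rep_form_text : Prop := ∀ (text : String), Dom_get_rep_form_text text → Spec_get_rep_form_text text (get_rep_form_text text)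

-- ===== LEMMAS AND PROOFS =====

theorem pvLoopA_eq (cs : List Char) : ∀ acc,
    pvLoopA cs acc = ((cs.take (pvPrefLenB cs)).filter (fun c => !(c == ','))).reverse ++ acc := by
  induction cs with
  | nil => intro acc; simp [pvLoopA, pvPrefLenB]
  | cons c cs ih =>
    intro acc
    by_cases hd : PySem.Chars.isdigit c = true
    · have hc : (c == ',') = false := by
        by_cases h : c = ','
        · subst h; exact absurd hd (by decide)
        · simp [h]
      simp [pvLoopA, pvPrefLenB, hd, hc, ih]
    · by_cases hc : (c == ',') = true
      · simp [pvLoopA, pvPrefLenB, hd, hc, ih]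
      · simp [pvLoopA, pvPrefLenB, hd, hc]

-- ===== VERDICT (by name: the statement is the Claim_ definition above) =====
theorem get_rep_form_text_spec : Claim_equal_get_rep_form_text := by
  intro text _
  show get_rep_form_text text = get_rep_form_text_alt text
  unfold get_rep_form_text get_rep_form_text_alt
  simp only [pvLoopA_eq, List.append_nil]
  generalize ((text.toList.take (pvPrefLenB text.toList)).filter (fun c => !(c == ','))).reverse = p
  cases p with
  | nil => rfl
  | cons x xs =>
    simp only [List.isEmpty_cons, Bool.false_eq_true, if_false]
    cases PySem.Int.ofChars? (x :: xs) <;> rfl
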